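-- pv_equiv track=rewrite | github.com/Maaz-Ali2001/Biblometrics-Engine | Biblometrics Engine.py | do_get_co_citations
-- ===== SOURCE A (Python) =====
-- def do_get_co_citations(data, doi1, doi2):
--     doi1_lst=[]
--     doi2_lst=[]
--     cited_together=0
--     for i in range(len(data)):
--         if data[i][2]==doi1:
--             doi1_lst.append(data[i][1])
--         elif data[i][2]==doi2:
--             doi2_lst.append(data[i][1])
--
--     for i in (doi1_lst):
--         if i in doi2_lst:
--             cited_together+=1
--     return cited_together
-- ===== SOURCE B (Python) =====
-- def do_get_co_citations(data, doi1, doi2):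
--     stats = {}
--     for row in data:
--         cnt, flag = stats.get(row[1], (0, False))
--         if row[2] == doi1:
--             stats[row[1]] = (cnt + 1, flag)
--         elif row[2] == doi2:
--             stats[row[1]] = (cnt, True)
--     return sum(cnt for cnt, flag in stats.values() if flag)
-- ===== Notes on version B (the rewrite author's own statement) =====
-- stated objective: alternative
-- what changed: Replaces A's two intermediate lists and per-element membership scan by a single pass building one dict of (doi1-citation count, cited-doi2 flag) per citing paper, then summing the flagged counts.
import Mathlib
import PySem

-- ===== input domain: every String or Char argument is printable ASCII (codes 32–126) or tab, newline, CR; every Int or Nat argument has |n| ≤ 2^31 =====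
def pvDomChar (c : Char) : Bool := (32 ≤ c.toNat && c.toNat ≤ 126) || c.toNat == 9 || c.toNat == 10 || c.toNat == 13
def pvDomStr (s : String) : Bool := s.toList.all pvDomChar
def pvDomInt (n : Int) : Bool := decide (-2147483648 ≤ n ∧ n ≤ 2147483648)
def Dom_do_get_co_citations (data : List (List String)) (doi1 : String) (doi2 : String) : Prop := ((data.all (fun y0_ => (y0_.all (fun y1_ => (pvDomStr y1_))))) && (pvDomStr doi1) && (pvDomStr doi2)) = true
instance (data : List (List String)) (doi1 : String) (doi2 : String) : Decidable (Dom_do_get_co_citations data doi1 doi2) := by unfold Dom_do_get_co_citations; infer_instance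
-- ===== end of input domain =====

-- B replaces A's two intermediate lists and membership-scan counting by a single dict pass
-- keeping (doi1-citation count, cited-doi2 flag) per citing paper, then sums the flagged counts.

-- ===== PORT A =====
def do_get_co_citations (data : List (List String)) (doi1 : String) (doi2 : String) : Int :=
  let p := (PySem.List.pyRange 0 (PySem.List.len data)).foldl
    (fun (acc : List String × List String) i =>
      if PySem.List.pyGetD (PySem.List.pyGetD data i []) 2 "" == doi1 then
        (acc.1 ++ [PySem.List.pyGetD (PySem.List.pyGetD data i []) 1 ""], acc.2)
      else if PySem.List.pyGetD (PySem.List.pyGetD data i []) 2 "" == doi2 then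
        (acc.1, acc.2 ++ [PySem.List.pyGetD (PySem.List.pyGetD data i []) 1 ""])
      else acc) ([], [])
  p.1.foldl (fun c i => if p.2.contains i then c + 1 else c) 0

-- ===== PORT B =====
def do_get_co_citations_alt (data : List (List String)) (doi1 : String) (doi2 : String) : Int :=
  let stats := data.foldl
    (fun (st : PySem.Dict String (Int × Bool)) row =>
      let k := PySem.List.pyGetD row 1 ""
      let v := st.getD k (0, false)
      if PySem.List.pyGetD row 2 "" == doi1 then st.insert k (v.1 + 1, v.2)
      else if PySem.List.pyGetD row 2 "" == doi2 then st.insert k (v.1, true)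
      else st) PySem.Dict.empty
  stats.values.foldl (fun s v => if v.2 then s + v.1 else s) 0

-- ===== PRECONDITION & SPEC =====
-- Pre_ excludes exactly the inputs on which Python A raises IndexError: a row with fewer than 3 fields.
def Pre_do_get_co_citations (data : List (List String)) (doi1 : String) (doi2 : String) : Prop :=
  ∀ row ∈ data, 3 ≤ row.length
instance (data : List (List String)) (doi1 : String) (doi2 : String) : Decidable (Pre_do_get_co_citations data doi1 doi2) := by unfold Pre_do_get_co_citations; infer_instance

def pvWitness_do_get_co_citations : List (List String) × String × String :=
  ([["a", "p1", "d1"], ["b", "p1", "d2"], ["c", "p2", "d1"]], "d1", "d2")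

def Spec_do_get_co_citations (data : List (List String)) (doi1 : String) (doi2 : String) (out : Int) : Prop := out = do_get_co_citations_alt data doi1 doi2
instance (data : List (List String)) (doi1 : String) (doi2 : String) (out : Int) : Decidable (Spec_do_get_co_citations data doi1 doi2 out) := by unfold Spec_do_get_co_citations; infer_instance

-- ===== CLAIM (what is proved, stated in full; the proofs are below) =====
def Claim_equal_do_get_co_citations : Prop := ∀ (data : List (List String)) (doi1 : String) (doi2 : String), Dom_do_get_co_citations data doi1 doi2 → Pre_do_get_co_citations data doi1 doi2 → Spec_do_get_co_citations data doi1 doi2 (do_get_co_citations data doi1 doi2)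

-- ===== LEMMAS AND PROOFS =====

-- the step function of A's first loop (the body of the for-loop, per row)
def pvStepA (doi1 doi2 : String) (acc : List String × List String) (row : List String) :
    List String × List String :=
  if PySem.List.pyGetD row 2 "" == doi1 then (acc.1 ++ [PySem.List.pyGetD row 1 ""], acc.2)
  else if PySem.List.pyGetD row 2 "" == doi2 then (acc.1, acc.2 ++ [PySem.List.pyGetD row 1 ""])
  else acc

-- the step function of B's single pass
def pvStepB (doi1 doi2 : String) (st : PySem.Dict String (Int × Bool)) (row : List String) :
    PySem.Dict String (Int × Bool) :=
  let k := PySem.List.pyGetD row 1 ""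
  let v := st.getD k (0, false)
  if PySem.List.pyGetD row 2 "" == doi1 then st.insert k (v.1 + 1, v.2)
  else if PySem.List.pyGetD row 2 "" == doi2 then st.insert k (v.1, true)
  else st

lemma pv_sum_indicator_zero (x : String) (p : String → Prop) [DecidablePred p] :
    ∀ ks : List String, x ∉ ks →
      (ks.map (fun k => if p k then (if x = k then (1 : Int) else 0) else 0)).sum = 0 := by
  intro ks
  induction ks with
  | nil => intro _; simp
  | cons k0 t ih =>
    intro hx
    have hxk : x ≠ k0 := fun h => hx (h ▸ List.mem_cons_self)
    have hxt : x ∉ t := fun h => hx (List.mem_cons_of_mem _ h)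
    simp [ih hxt, hxk]

lemma pv_sum_indicator (x : String) (p : String → Prop) [DecidablePred p] :
    ∀ ks : List String, ks.Nodup → x ∈ ks →
      (ks.map (fun k => if p k then (if x = k then (1 : Int) else 0) else 0)).sum
        = if p x then 1 else 0 := by
  intro ks
  induction ks with
  | nil => intro _ h; cases h
  | cons k0 t ih =>
    intro hnd hx
    rcases List.mem_cons.mp hx with h | h
    · subst h
      simp [pv_sum_indicator_zero x p t (List.nodup_cons.mp hnd).1]
    · have hne : x ≠ k0 := by
        intro he; exact (List.nodup_cons.mp hnd).1 (he ▸ h)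
      simp [ih (List.nodup_cons.mp hnd).2 h, hne]

-- sum over a nodup key set covering L1 of (flag → count) equals the direct count over L1
lemma pv_keysum (L2 : List String) :
    ∀ (L1 ks : List String), ks.Nodup → (∀ x ∈ L1, x ∈ ks) →
      (ks.map (fun k => if k ∈ L2 then (L1.count k : Int) else 0)).sum
        = (L1.countP (fun i => decide (i ∈ L2)) : Int) := by
  intro L1
  induction L1 with
  | nil => intro ks _ _; simp
  | cons x t ih =>
    intro ks hnd hsub
    have hx : x ∈ ks := hsub x List.mem_cons_self
    have hsub' : ∀ y ∈ t, y ∈ ks := fun y hy => hsub y (List.mem_cons_of_mem _ hy)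
    have hsplit :
        (ks.map (fun k => if k ∈ L2 then ((x :: t).count k : Int) else 0)).sum
          = (ks.map (fun k => if k ∈ L2 then (t.count k : Int) else 0)).sum
            + (ks.map (fun k => if k ∈ L2 then (if x = k then (1 : Int) else 0) else 0)).sum := by
      clear hsub hsub' hx hnd ih
      induction ks with
      | nil => simp
      | cons k0 t0 ih0 =>
        simp only [List.map_cons, List.sum_cons, ih0]
        by_cases h : k0 ∈ L2
        · by_cases h2 : x = k0
          · subst h2; simp [h]; ring
          · simp [h, h2]
            ring
        · simp [h]
    rw [hsplit, ih ks hnd hsub', pv_sum_indicator x (fun k => k ∈ L2) ks hnd hx]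
    by_cases h : x ∈ L2
    · simp [h]
    · simp [h]

-- the central invariant: the dict built by B's pass mirrors the two lists built by A's first pass
lemma pv_inv (doi1 doi2 : String) :
    ∀ (data : List (List String)) (L1 L2 : List String) (st : PySem.Dict String (Int × Bool)),
      st.keys.Nodup →
      (∀ k, st.getD k (0, false) = ((L1.count k : Int), L2.contains k)) →
      (∀ k, st.contains k = (L1.contains k || L2.contains k)) →
      ((data.foldl (pvStepB doi1 doi2) st).keys.Nodup ∧
       (∀ k, (data.foldl (pvStepB doi1 doi2) st).getD k (0, false)
          = (((data.foldl (pvStepA doi1 doi2) (L1, L2)).1.count k : Int),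
             (data.foldl (pvStepA doi1 doi2) (L1, L2)).2.contains k)) ∧
       (∀ k, (data.foldl (pvStepB doi1 doi2) st).contains k
          = ((data.foldl (pvStepA doi1 doi2) (L1, L2)).1.contains k
             || (data.foldl (pvStepA doi1 doi2) (L1, L2)).2.contains k))) := by
  intro data
  induction data with
  | nil => intro L1 L2 st h1 h2 h3; exact ⟨h1, h2, h3⟩
  | cons row rest ih =>
    intro L1 L2 st h1 h2 h3
    simp only [List.foldl_cons]
    by_cases hd1 : PySem.List.pyGetD row 2 "" == doi1
    · have hB : pvStepB doi1 doi2 st row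
          = st.insert (PySem.List.pyGetD row 1 "")
              ((st.getD (PySem.List.pyGetD row 1 "") (0, false)).1 + 1,
               (st.getD (PySem.List.pyGetD row 1 "") (0, false)).2) := by
        simp [pvStepB, hd1]
      have hA : pvStepA doi1 doi2 (L1, L2) row
          = (L1 ++ [PySem.List.pyGetD row 1 ""], L2) := by
        simp [pvStepA, hd1]
      rw [hB, hA]
      apply ih
      · exact PySem.Dict.nodup_keys_insert _ _ _ h1
      · intro k
        rw [PySem.Dict.getD_insert]
        by_cases hk : k = PySem.List.pyGetD row 1 ""
        · subst hk
          simp [h2, List.count_append]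
        · simp [hk, h2, List.count_append, Ne.symm hk]
      · intro k
        rw [PySem.Dict.contains_insert]
        by_cases hk : k = PySem.List.pyGetD row 1 ""
        · subst hk; simp [List.contains_append]
        · simp [hk, h3, List.contains_append, Ne.symm hk]
    · by_cases hd2 : PySem.List.pyGetD row 2 "" == doi2
      · have hB : pvStepB doi1 doi2 st row
            = st.insert (PySem.List.pyGetD row 1 "")
                ((st.getD (PySem.List.pyGetD row 1 "") (0, false)).1, true) := by
          simp [pvStepB, hd1, hd2]
        have hA : pvStepA doi1 doi2 (L1, L2) row
            = (L1, L2 ++ [PySem.List.pyGetD row 1 ""]) := by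
          simp [pvStepA, hd1, hd2]
        rw [hB, hA]
        apply ih
        · exact PySem.Dict.nodup_keys_insert _ _ _ h1
        · intro k
          rw [PySem.Dict.getD_insert]
          by_cases hk : k = PySem.List.pyGetD row 1 ""
          · subst hk; simp [h2, List.contains_append]
          · simp [hk, h2, List.contains_append, Ne.symm hk]
        · intro k
          rw [PySem.Dict.contains_insert]
          by_cases hk : k = PySem.List.pyGetD row 1 ""
          · subst hk; simp [List.contains_append]
          · simp [hk, h3, List.contains_append, Ne.symm hk]
      · have hB : pvStepB doi1 doi2 st row = st := by
          simp [pvStepB, hd1, hd2]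
        have hA : pvStepA doi1 doi2 (L1, L2) row = (L1, L2) := by
          simp [pvStepA, hd1, hd2]
        rw [hB, hA]
        exact ih L1 L2 st h1 h2 h3

lemma pv_foldl_if_add (p : String → Bool) (f : String → Int) :
    ∀ (l : List String) (a : Int),
      l.foldl (fun s k => if p k then s + f k else s) a
        = a + (l.map (fun k => if p k then f k else 0)).sum := by
  intro l
  induction l with
  | nil => intro a; simp
  | cons x t ih =>
    intro a
    by_cases h : p x
    · simp [List.foldl_cons, h, ih]; ring
    · simp [List.foldl_cons, h, ih]

-- bridge: A's counting loop equals B's sum over the dict's values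
lemma pv_final (L1 L2 : List String) (st : PySem.Dict String (Int × Bool))
    (hnd : st.keys.Nodup)
    (h2 : ∀ k, st.getD k (0, false) = ((L1.count k : Int), L2.contains k))
    (h3 : ∀ k, st.contains k = (L1.contains k || L2.contains k)) :
    L1.foldl (fun (c : Int) i => if L2.contains i then c + 1 else c) 0
      = st.values.foldl (fun (s : Int) v => if v.2 then s + v.1 else s) 0 := by
  rw [PySem.Dict.values_eq_map_keys st hnd ((0 : Int), false)]
  have hmap : st.keys.map (fun k => st.getD k (0, false))
      = st.keys.map (fun k => ((L1.count k : Int), L2.contains k)) :=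
    List.map_congr_left (fun k _ => h2 k)
  rw [hmap, List.foldl_map]
  have hproj : (fun (x : Int) (y : String) =>
      if ((L1.count y : Int), L2.contains y).2 then x + ((L1.count y : Int), L2.contains y).1 else x)
      = fun (x : Int) (y : String) => if L2.contains y then x + (L1.count y : Int) else x := rfl
  rw [hproj, pv_foldl_if_add (fun y => L2.contains y) (fun y => (L1.count y : Int)) st.keys 0,
      PySem.List.foldl_count_if (fun i => L2.contains i) L1 0]
  have hmem : ∀ x ∈ L1, x ∈ st.keys := by
    intro x hx
    refine (PySem.Dict.contains_iff_mem_keys st x).mp ?_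
    rw [h3 x]
    simp only [List.contains_iff_mem, Bool.or_eq_true]
    exact Or.inl hx
  have hks := pv_keysum L2 L1 st.keys hnd hmem
  simp only [List.contains_eq_mem, decide_eq_true_eq] at *
  rw [hks]

-- ===== VERDICT (by name: the statement is the Claim_ definition above) =====
theorem do_get_co_citations_spec : Claim_equal_do_get_co_citations := by
  intro data doi1 doi2 _ _
  unfold Spec_do_get_co_citations do_get_co_citations do_get_co_citations_alt
  show ((PySem.List.pyRange 0 (PySem.List.len data)).foldl
          (fun (acc : List String × List String) j => pvStepA doi1 doi2 acc (PySem.List.pyGetD data j []))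
          (([], []) : List String × List String)).1.foldl
        (fun (c : Int) i =>
          if ((PySem.List.pyRange 0 (PySem.List.len data)).foldl
                (fun (acc : List String × List String) j => pvStepA doi1 doi2 acc (PySem.List.pyGetD data j []))
                (([], []) : List String × List String)).2.contains i then c + 1 else c) 0
      = (data.foldl (pvStepB doi1 doi2) PySem.Dict.empty).values.foldl
          (fun (s : Int) v => if v.2 then s + v.1 else s) 0
  rw [PySem.List.foldl_pyRange_pyGetD data ([] : List String)
      (pvStepA doi1 doi2) (([], []) : List String × List String) le_rfl]
  simp only [Int.toNat_zero, List.drop_zero]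
  obtain ⟨hnd, h2, h3⟩ := pv_inv doi1 doi2 data [] [] PySem.Dict.empty
    PySem.Dict.nodup_keys_empty
    (by intro k; simp [PySem.Dict.getD_empty])
    (by intro k; simp [PySem.Dict.contains_empty])
  exact pv_final _ _ _ hnd h2 h3
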